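-- pv_equiv track=rewrite | github.com/Harmiel715/Mutterboard | qingboard.py | _balanced_row_widths
-- ===== SOURCE A (Python) =====
-- from typing import Dict, List, Optional, Set, Tuple, Union
--
-- KEY_WIDTHS = {
--     "`": 1,
--     "Space": 12,
--     "CapsLock": 3,
--     "Shift_L": 4,
--     "Shift_R": 4,
--     "Backspace": 3,
--     "\\": 3,
--     "Enter": 4,
-- }
--
-- def _balanced_row_widths(row: List[str], target_width: int) -> List[int]:
--     """通过将多余宽度分配到前面的按键，使整行宽度达到 target_width | Distribute extra width to earlier keys to reach target_width"""
--     widths = [KEY_WIDTHS.get(label, 2) for label in row]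
--     deficit = target_width - sum(widths)
--     idx = 0
--     while deficit > 0 and widths:
--         widths[idx % len(widths)] += 1
--         idx += 1
--         deficit -= 1
--     return widths
-- ===== SOURCE B (Python) =====
-- from typing import List
--
-- KEY_WIDTHS = {
--     "`": 1,
--     "Space": 12,
--     "CapsLock": 3,
--     "Shift_L": 4,
--     "Shift_R": 4,
--     "Backspace": 3,
--     "\\": 3,
--     "Enter": 4,
-- }
--
-- def _balanced_row_widths(row: List[str], target_width: int) -> List[int]:
--     """Closed form: each key gets deficit//n extra, and the first deficit%n keys one more."""
--     widths = [KEY_WIDTHS.get(label, 2) for label in row]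
--     deficit = target_width - sum(widths)
--     if deficit > 0 and widths:
--         q, r = divmod(deficit, len(widths))
--         return [w + q + (1 if i < r else 0) for i, w in enumerate(widths)]
--     return widths
-- ===== Notes on version B (the rewrite author's own statement) =====
-- stated objective: alternative
-- what changed: Replaces the O(deficit) round-robin increment loop with a closed-form divmod distribution: every key gets deficit//n extra width and the first deficit%n keys one more.
import Mathlib
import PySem

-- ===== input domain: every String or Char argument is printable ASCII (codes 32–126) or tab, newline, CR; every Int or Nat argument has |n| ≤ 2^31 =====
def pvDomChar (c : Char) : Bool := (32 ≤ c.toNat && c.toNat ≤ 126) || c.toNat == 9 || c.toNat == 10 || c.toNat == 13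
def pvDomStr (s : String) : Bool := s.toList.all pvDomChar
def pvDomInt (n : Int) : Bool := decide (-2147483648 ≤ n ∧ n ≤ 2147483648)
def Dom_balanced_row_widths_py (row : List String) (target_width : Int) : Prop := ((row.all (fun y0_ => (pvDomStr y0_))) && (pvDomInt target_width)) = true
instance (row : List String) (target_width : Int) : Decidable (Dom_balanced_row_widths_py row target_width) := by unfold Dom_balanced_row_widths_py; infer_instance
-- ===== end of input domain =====

-- B replaces A's round-robin increment loop by a closed-form divmod distribution (alternative algorithm; same measured cost on the generated inputs).

-- module constant KEY_WIDTHS (shared by both Pythons)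
def KEY_WIDTHS : PySem.Dict String Int :=
  PySem.Dict.ofList [("`", 1), ("Space", 12), ("CapsLock", 3), ("Shift_L", 4),
                     ("Shift_R", 4), ("Backspace", 3), ("\\", 3), ("Enter", 4)]

-- ===== PORT A =====
-- the while loop: while deficit > 0 and widths: widths[idx % len(widths)] += 1; idx += 1; deficit -= 1
def balanced_row_widths_loop (widths : List Int) (deficit : Int) (idx : Nat) : List Int :=
  if h : deficit > 0 ∧ widths ≠ [] then
    balanced_row_widths_loop (widths.modify (idx % widths.length) (· + 1)) (deficit - 1) (idx + 1)
  else widths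
termination_by deficit.toNat
decreasing_by omega

def balanced_row_widths_py (row : List String) (target_width : Int) : List Int :=
  let widths := row.map (fun label => PySem.Dict.getD KEY_WIDTHS label 2)
  let deficit := target_width - widths.sum
  balanced_row_widths_loop widths deficit 0

-- ===== PORT B =====
def balanced_row_widths_py_alt (row : List String) (target_width : Int) : List Int :=
  let widths := row.map (fun label => PySem.Dict.getD KEY_WIDTHS label 2)
  let deficit := target_width - widths.sum
  if deficit > 0 ∧ widths ≠ [] then
    let q := PySem.Int.floordiv deficit widths.length
    let r := PySem.Int.mod deficit widths.length
    widths.mapIdx (fun i w => w + q + (if (i : Int) < r then 1 else 0))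
  else widths

-- ===== PRECONDITION & SPEC =====
def Spec_balanced_row_widths_py (row : List String) (target_width : Int) (out : List Int) : Prop := out = balanced_row_widths_py_alt row target_width
instance (row : List String) (target_width : Int) (out : List Int) : Decidable (Spec_balanced_row_widths_py row target_width out) := by unfold Spec_balanced_row_widths_py; infer_instance

-- ===== CLAIM (what is proved, stated in full; the proofs are below) =====
def Claim_equal_balanced_row_widths_py : Prop := ∀ (row : List String) (target_width : Int), Dom_balanced_row_widths_py row target_width → Spec_balanced_row_widths_py row target_width (balanced_row_widths_py row target_width)

-- ===== LEMMAS AND PROOFS =====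

-- the loop adds, at each position i, the number of steps k < m with (idx + k) % n = i
lemma loop_eq_count (m : Nat) : ∀ (widths : List Int) (idx : Nat), widths ≠ [] →
    balanced_row_widths_loop widths (m : Int) idx =
      widths.mapIdx (fun i w =>
        w + (((List.range m).countP (fun k => (idx + k) % widths.length = i)) : Int)) := by
  induction m with
  | zero =>
    intro widths idx _
    rw [balanced_row_widths_loop]
    simp
    apply List.ext_getElem <;> simp
  | succ m ih =>
    intro widths idx hne
    rw [balanced_row_widths_loop]
    rw [dif_pos ⟨by positivity, hne⟩]
    have h1 : ((m + 1 : Nat) : Int) - 1 = (m : Int) := by push_cast; ring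
    rw [h1]
    have hne' : widths.modify (idx % widths.length) (· + 1) ≠ [] := by
      simpa using hne
    rw [ih _ (idx + 1) hne']
    apply List.ext_getElem
    · simp
    · intro i h₁ h₂
      simp only [List.getElem_mapIdx, List.getElem_modify, List.length_modify] at *
      have hcount : (List.range (m + 1)).countP (fun k => (idx + k) % widths.length = i)
          = (if idx % widths.length = i then 1 else 0)
            + (List.range m).countP (fun k => (idx + 1 + k) % widths.length = i) := by
        rw [List.range_succ_eq_map, List.countP_cons, List.countP_map]
        have harg : ((fun k => decide ((idx + k) % widths.length = i)) ∘ Nat.succ)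
            = (fun k => decide ((idx + 1 + k) % widths.length = i)) := by
          funext k
          simp only [Function.comp, Nat.succ_eq_add_one]
          have : idx + (k + 1) = idx + 1 + k := by omega
          rw [this]
        rw [harg]
        simp [Nat.add_comm]
      rw [hcount]
      by_cases hj : idx % widths.length = i <;> simp [hj] <;> ring

-- counting hits of a round-robin starting at 0: position i < n is hit m / n times, plus once more if i < m % n
lemma count_roundrobin (n m i : Nat) (hn : 0 < n) (hi : i < n) :
    (List.range m).countP (fun k => k % n = i) = m / n + (if i < m % n then 1 else 0) := by
  induction m with
  | zero => simp
  | succ m ih =>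
    rw [List.range_succ, List.countP_append, ih]
    have hdm : m = n * (m / n) + m % n := by
      have := Nat.div_add_mod m n
      omega
    have hr : m % n < n := Nat.mod_lt _ hn
    by_cases hlast : m % n + 1 = n
    · have h3 : n * (m / n + 1) = n * (m / n) + n := by ring
      obtain ⟨hdiv, hmod⟩ := (Nat.div_mod_unique hn).mpr
        (⟨by omega, hn⟩ : 0 + n * (m / n + 1) = m + 1 ∧ 0 < n)
      rw [hdiv, hmod]
      simp only [List.countP_cons, List.countP_nil, decide_eq_true_eq]
      split_ifs <;> omega
    · obtain ⟨hdiv, hmod⟩ := (Nat.div_mod_unique hn).mpr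
        (⟨by omega, by omega⟩ : m % n + 1 + n * (m / n) = m + 1 ∧ m % n + 1 < n)
      rw [hdiv, hmod]
      simp only [List.countP_cons, List.countP_nil, decide_eq_true_eq]
      split_ifs <;> omega

-- closed form of the loop started at idx = 0
lemma balanced_closed (widths : List Int) (deficit : Int) :
    balanced_row_widths_loop widths deficit 0 =
      if deficit > 0 ∧ widths ≠ [] then
        widths.mapIdx (fun i w => w + PySem.Int.floordiv deficit widths.length
          + (if (i : Int) < PySem.Int.mod deficit widths.length then 1 else 0))
      else widths := by
  by_cases hc : deficit > 0 ∧ widths ≠ []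
  · rw [if_pos hc]
    obtain ⟨hpos, hne⟩ := hc
    have hn : 0 < widths.length := List.length_pos_iff.mpr hne
    have hm : deficit = ((deficit.toNat : Nat) : Int) := by omega
    rw [hm, loop_eq_count _ _ _ hne]
    apply List.ext_getElem
    · simp
    · intro i h₁ h₂
      simp only [List.getElem_mapIdx] at *
      have hcnt := count_roundrobin widths.length deficit.toNat i hn (by simpa using h₁)
      simp only [Nat.zero_add]
      have hq : PySem.Int.floordiv ((deficit.toNat : Nat) : Int) widths.length
          = ((deficit.toNat / widths.length : Nat) : Int) := by
        exact_mod_cast PySem.Int.floordiv_natCast deficit.toNat widths.length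
      have hr : PySem.Int.mod ((deficit.toNat : Nat) : Int) widths.length
          = ((deficit.toNat % widths.length : Nat) : Int) := by
        exact_mod_cast PySem.Int.mod_natCast deficit.toNat widths.length
      simp only [hq, hr]
      rw [hcnt]
      by_cases hlt : i < deficit.toNat % widths.length
      · rw [if_pos hlt, if_pos (by exact_mod_cast hlt)]; push_cast; ring
      · rw [if_neg hlt, if_neg (by exact_mod_cast hlt)]; push_cast; ring
  · rw [if_neg hc]
    rw [balanced_row_widths_loop, dif_neg hc]

-- ===== VERDICT (by name: the statement is the Claim_ definition above) =====
theorem balanced_row_widths_py_spec : Claim_equal_balanced_row_widths_py := by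
  intro row target_width _
  unfold Spec_balanced_row_widths_py
  simp only [balanced_row_widths_py, balanced_row_widths_py_alt]
  exact balanced_closed _ _
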